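-- pv_equiv track=rewrite | github.com/hgbrian/foldism | backends/chai1.py | _parse_paired_a3m_chai
-- ===== SOURCE A (Python) =====
-- def _parse_paired_a3m_chai(content: str, num_chains: int) -> dict[int, list[tuple[str, str]]]:
--     """Parse paired A3M into per-chain (header, sequence) lists. Skips query."""
--     chain_seqs: dict[int, list[tuple[str, str]]] = {i: [] for i in range(num_chains)}
--     current_chain: int | None = None
--     current_header = ""
--     current_seq_lines: list[str] = []
--
--     for line in content.splitlines():
--         line = line.strip()
--         if not line or line.startswith("#"):
--             continue
--         if line.startswith(">"):
--             if current_chain is not None and current_seq_lines: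
--                 chain_idx = current_chain - 101
--                 if 0 <= chain_idx < num_chains:
--                     seq = "".join(current_seq_lines)
--                     seq = "".join(c for c in seq if not c.islower())
--                     chain_seqs[chain_idx].append((current_header, seq))
--             current_seq_lines = []
--
--             header = line[1:].strip()
--             current_header = header
--             # Chain IDs are standalone headers like ">101" or ">102\tinfo"
--             # Do NOT scan all tab fields — alignment positions can be 101/102
--             first_field = header.split("\t")[0].strip()
--             try:
--                 chain_id = int(first_field)
--                 if 101 <= chain_id < 101 + num_chains:
--                     current_chain = chain_id
--             except ValueError:
--                 pass  # keep current_chain — this is a hit within the current chain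
--         else:
--             if current_chain is not None:
--                 current_seq_lines.append(line)
--
--     if current_chain is not None and current_seq_lines:
--         chain_idx = current_chain - 101
--         if 0 <= chain_idx < num_chains:
--             seq = "".join(current_seq_lines)
--             seq = "".join(c for c in seq if not c.islower())
--             chain_seqs[chain_idx].append((current_header, seq))
--
--     # Skip query sequences (first in each chain)
--     for idx in chain_seqs:
--         if chain_seqs[idx]:
--             chain_seqs[idx] = chain_seqs[idx][1:]
--
--     return chain_seqs
-- ===== SOURCE B (Python) =====
-- def _parse_paired_a3m_chai(content: str, num_chains: int) -> dict[int, list[tuple[str, str]]]: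
--     """Parse paired A3M into per-chain (header, sequence) lists. Skips query.
--
--     Two-phase: (1) group the meaningful lines into records (header, chain, fragments),
--     (2) build each chain's list by filtering the records for that chain.
--     """
--     # Phase 1: build the ordered record list.
--     records: list[tuple[str, int | None, list[str]]] = []
--     chain: int | None = None
--     lines = [ln.strip() for ln in content.splitlines()]
--     for line in (ln for ln in lines if ln and not ln.startswith("#")):
--         if line.startswith(">"):
--             header = line[1:].strip()
--             field = header.split("\t")[0].strip()
--             try:
--                 cid = int(field)
--                 if 101 <= cid < 101 + num_chains:
--                     chain = cid
--             except ValueError: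
--                 pass
--             records.append((header, chain, []))
--         elif chain is not None:
--             records[-1][2].append(line)
--
--     # Phase 2: per chain, collect its records' cleaned sequences; drop the query (first entry).
--     result: dict[int, list[tuple[str, str]]] = {}
--     for i in range(num_chains):
--         entries = [
--             (hdr, "".join(ch for ch in "".join(frags) if not ch.islower()))
--             for (hdr, c, frags) in records
--             if c == 101 + i and frags
--         ]
--         result[i] = entries[1:]
--     return result
-- ===== Notes on version B (the rewrite author's own statement) =====
-- stated objective: alternative
-- what changed: Replaces A's single stateful pass (mutable current_header/current_seq_lines with flush-on-next-header and a trailing flush) by a two-phase pipeline: first group lines into an ordered list of (header, chain, fragments) records, then build each chain's list by a per-chain filter over the records and drop the query entry.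
import Mathlib
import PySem

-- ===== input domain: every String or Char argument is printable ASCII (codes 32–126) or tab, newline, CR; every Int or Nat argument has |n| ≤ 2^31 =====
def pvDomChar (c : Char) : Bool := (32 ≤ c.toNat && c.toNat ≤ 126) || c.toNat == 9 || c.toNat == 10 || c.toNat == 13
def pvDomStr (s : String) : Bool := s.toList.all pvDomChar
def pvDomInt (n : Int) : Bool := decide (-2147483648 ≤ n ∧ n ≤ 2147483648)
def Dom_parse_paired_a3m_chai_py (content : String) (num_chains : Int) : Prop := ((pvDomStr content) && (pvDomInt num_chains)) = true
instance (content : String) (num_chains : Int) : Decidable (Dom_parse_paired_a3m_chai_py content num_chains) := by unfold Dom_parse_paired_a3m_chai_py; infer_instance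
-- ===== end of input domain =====

-- B replaces A's single stateful flush-on-next-header pass by a two-phase pipeline
-- (group lines into records, then a per-chain filter over the records): an alternative
-- decomposition of the same cost, not claimed faster.

-- Helpers shared by both ports (this code is textually identical in the two Pythons).
-- Python c.islower() for a single char; exact on the printable-ASCII input domain.
def pvIsLowerAscii (c : Char) : Bool := 'a' ≤ c && c ≤ 'z'

-- seq = "".join(frags); "".join(c for c in seq if not c.islower())
def pvClean (frags : List String) : String :=
  String.ofList ((PySem.Str.join "" frags).toList.filter (fun c => !pvIsLowerAscii c))

-- 'not line or line.startswith("#")'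
def pvSkip (line : String) : Bool := line == "" || PySem.Str.startswith line "#"

-- 'line[1:].strip()'
def pvHeaderOf (line : String) : String := PySem.Str.strip (PySem.Str.slice line (some 1) none)

-- 'header.split("\t")[0].strip()'; split? is some and nonempty because the separator is
-- non-empty, so the getD/headD defaults are unreachable.
def pvFirstField (h : String) : String :=
  PySem.Str.strip (((PySem.Str.split? h "\t").getD [h]).headD h)

-- the try/int/range update rule for current_chain
def pvChainUpd (n : Int) (chain : Option Int) (header : String) : Option Int :=
  match PySem.Int.ofStr? (pvFirstField header) with
  | some cid => if 101 ≤ cid ∧ cid < 101 + n then some cid else chain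
  | none => chain

-- ===== PORT A =====
-- A's dict has the fixed key set 0..num_chains-1 (created up front, only modified in
-- place), so it is represented positionally by a list of length num_chains and rendered
-- as the association list in key (= insertion) order at the return.  pvFlushA is A's
-- duplicated flush block ('if current_chain is not None and current_seq_lines: ...').
def pvFlushA (n : Int) (table : List (List (String × String))) (chain : Option Int)
    (header : String) (frags : List String) : List (List (String × String)) :=
  match chain with
  | some c =>
    if frags ≠ [] then
      let idx := c - 101
      if 0 ≤ idx ∧ idx < n then table.modify idx.toNat (· ++ [(header, pvClean frags)])
      else table
    else table
  | none => table

def pvStepA (n : Int) (s : List (List (String × String)) × Option Int × String × List String)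
    (raw : String) : List (List (String × String)) × Option Int × String × List String :=
  let line := PySem.Str.strip raw
  if pvSkip line then s
  else
    let (table, chain, header, frags) := s
    if PySem.Str.startswith line ">" then
      let table' := pvFlushA n table chain header frags
      let header' := pvHeaderOf line
      (table', pvChainUpd n chain header', header', [])
    else
      match chain with
      | some _ => (table, chain, header, frags ++ [line])
      | none => (table, chain, header, frags)

def parse_paired_a3m_chai_py (content : String) (num_chains : Int) :
    List (Int × List (String × String)) :=
  let s := (PySem.Str.splitlines content).foldl (pvStepA num_chains)
             (List.replicate num_chains.toNat [], none, "", [])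
  let table := pvFlushA num_chains s.1 s.2.1 s.2.2.1 s.2.2.2
  (List.range num_chains.toNat).map (fun (i : Nat) =>
    ((i : Int), if table.getD i [] ≠ [] then (table.getD i []).drop 1 else table.getD i []))

-- ===== PORT B =====
-- records[-1][2].append(line); the [] case is unreachable (chain ≠ none ⇒ records ≠ []).
def pvAppendLast (records : List (String × Option Int × List String)) (line : String) :
    List (String × Option Int × List String) :=
  match records with
  | [] => []
  | [r] => [(r.1, r.2.1, r.2.2 ++ [line])]
  | r :: rs => r :: pvAppendLast rs line

def pvStepB (n : Int) (s : List (String × Option Int × List String) × Option Int)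
    (line : String) : List (String × Option Int × List String) × Option Int :=
  let (records, chain) := s
  if PySem.Str.startswith line ">" then
    let header := pvHeaderOf line
    let chain' := pvChainUpd n chain header
    (records ++ [(header, chain', [])], chain')
  else
    match chain with
    | some _ => (pvAppendLast records line, chain)
    | none => s

def parse_paired_a3m_chai_py_alt (content : String) (num_chains : Int) :
    List (Int × List (String × String)) :=
  let lines := ((PySem.Str.splitlines content).map PySem.Str.strip).filter (fun l => !pvSkip l)
  let records := (lines.foldl (pvStepB num_chains) ([], none)).1
  (List.range num_chains.toNat).map (fun (i : Nat) =>
    ((i : Int),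
     (((records.filter (fun r => r.2.1 == some (101 + (i : Int)) && !(r.2.2 == ([] : List String)))).map
        (fun r => (r.1, pvClean r.2.2))).drop 1)))   -- entries[1:]

-- ===== PRECONDITION & SPEC =====
def Spec_parse_paired_a3m_chai_py (content : String) (num_chains : Int) (out : List (Int × List (String × String))) : Prop := out = parse_paired_a3m_chai_py_alt content num_chains
instance (content : String) (num_chains : Int) (out : List (Int × List (String × String))) : Decidable (Spec_parse_paired_a3m_chai_py content num_chains out) := by unfold Spec_parse_paired_a3m_chai_py; infer_instance

-- ===== CLAIM (what is proved, stated in full; the proofs are below) =====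
def Claim_equal_parse_paired_a3m_chai_py : Prop := ∀ (content : String) (num_chains : Int), Dom_parse_paired_a3m_chai_py content num_chains → Spec_parse_paired_a3m_chai_py content num_chains (parse_paired_a3m_chai_py content num_chains)

-- ===== LEMMAS AND PROOFS =====

-- what B's phase 2 collects for chain index i from a record list
def pvAgg (records : List (String × Option Int × List String)) (i : Nat) :
    List (String × String) :=
  (records.filter (fun r => r.2.1 == some (101 + (i : Int)) && !(r.2.2 == ([] : List String)))).map
    (fun r => (r.1, pvClean r.2.2))

-- invariant tying A's loop state to B's record list
def pvInv (n : Int) (table : List (List (String × String))) (chain : Option Int)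
    (header : String) (frags : List String)
    (records : List (String × Option Int × List String)) : Prop :=
  table.length = n.toNat ∧
  (∀ c, chain = some c → 101 ≤ c ∧ c < 101 + n) ∧
  (records = [] → chain = none ∧ frags = [] ∧ ∀ i, table.getD i [] = []) ∧
  (∀ rs r, records = rs ++ [r] →
      r = (header, chain, frags) ∧ ∀ i < n.toNat, table.getD i [] = pvAgg rs i)

-- relation between the two fold states
def pvRel (n : Int) (sA : List (List (String × String)) × Option Int × String × List String)
    (sB : List (String × Option Int × List String) × Option Int) : Prop :=
  pvInv n sA.1 sA.2.1 sA.2.2.1 sA.2.2.2 sB.1 ∧ sA.2.1 = sB.2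

theorem pvAgg_nil (i : Nat) : pvAgg [] i = [] := rfl

theorem pvAgg_append (rs : List (String × Option Int × List String))
    (r : String × Option Int × List String) (i : Nat) :
    pvAgg (rs ++ [r]) i =
      pvAgg rs i ++
        (if r.2.1 = some (101 + (i : Int)) ∧ r.2.2 ≠ [] then [(r.1, pvClean r.2.2)] else []) := by
  rcases r with ⟨h1, c1, f1⟩
  simp only [pvAgg, List.filter_append, List.map_append, List.filter_singleton]
  by_cases hc : c1 = some (101 + (i : Int))
  · cases f1 <;> simp [hc]
  · have hb : (c1 == some (101 + (i : Int))) = false := beq_eq_false_iff_ne.mpr hc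
    cases f1 <;> simp [hc, hb]

theorem pvAppendLast_concat (rs : List (String × Option Int × List String))
    (r : String × Option Int × List String) (line : String) :
    pvAppendLast (rs ++ [r]) line = rs ++ [(r.1, r.2.1, r.2.2 ++ [line])] := by
  induction rs with
  | nil => rfl
  | cons a as ih => cases as <;> simp_all [pvAppendLast]

theorem pvChainUpd_good (n : Int) (chain : Option Int) (header : String)
    (h : ∀ c, chain = some c → 101 ≤ c ∧ c < 101 + n) :
    ∀ c, pvChainUpd n chain header = some c → 101 ≤ c ∧ c < 101 + n := by
  intro c hc
  unfold pvChainUpd at hc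
  cases hof : PySem.Int.ofStr? (pvFirstField header) with
  | none => rw [hof] at hc; exact h c hc
  | some cid =>
    rw [hof] at hc
    simp only at hc
    split_ifs at hc with hr
    · cases hc; exact hr
    · exact h c hc

theorem pvGetD_modify_append (table : List (List (String × String))) (j i : Nat)
    (e : String × String) (hj : j < table.length) :
    (table.modify j (· ++ [e])).getD i [] =
      if i = j then table.getD i [] ++ [e] else table.getD i [] := by
  by_cases h : i = j
  · subst h
    simp [List.getD, hj]
  · have h' : ¬j = i := fun e => h e.symm
    rw [if_neg h]
    simp only [List.getD, List.getElem?_modify, h', if_false]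
    cases table[i]? <;> simp

-- closing the open record: A's flush block realises B's aggregate over all records
theorem pvFlush_agg (n : Int) (table : List (List (String × String))) (chain : Option Int)
    (header : String) (frags : List String)
    (records : List (String × Option Int × List String))
    (hInv : pvInv n table chain header frags records) :
    (pvFlushA n table chain header frags).length = n.toNat ∧
    ∀ i < n.toNat, (pvFlushA n table chain header frags).getD i [] = pvAgg records i := by
  obtain ⟨hlen, hgood, hnil, hcons⟩ := hInv
  rcases records.eq_nil_or_concat with hrec | ⟨rs, r, hrec⟩
  · subst hrec
    obtain ⟨hc, hf, ht⟩ := hnil rfl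
    subst hc hf
    refine ⟨by simp [pvFlushA, hlen], fun i _ => ?_⟩
    rw [pvAgg_nil]
    exact ht i
  · rw [List.concat_eq_append] at hrec
    obtain ⟨hr, htab⟩ := hcons rs r hrec
    subst hrec hr
    cases chain with
    | none =>
      refine ⟨by simp [pvFlushA, hlen], fun i hi => ?_⟩
      rw [pvAgg_append, if_neg (by simp), List.append_nil]
      exact htab i hi
    | some c =>
      obtain ⟨hc1, hc2⟩ := hgood c rfl
      by_cases hf : frags = ([] : List String)
      · subst hf
        refine ⟨by simp [pvFlushA, hlen], fun i hi => ?_⟩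
        rw [pvAgg_append, if_neg (by simp), List.append_nil]
        exact htab i hi
      · have hfl : pvFlushA n table (some c) header frags =
            table.modify (c - 101).toNat (· ++ [(header, pvClean frags)]) := by
          simp only [pvFlushA]
          rw [if_pos hf, if_pos (show (0:Int) ≤ c - 101 ∧ c - 101 < n by omega)]
        rw [hfl]
        refine ⟨by simp [hlen], fun i hi => ?_⟩
        rw [pvAgg_append,
          pvGetD_modify_append table (c - 101).toNat i _ (by rw [hlen]; omega)]
        by_cases heq : c = 101 + (i : Int)
        · have hidx : i = (c - 101).toNat := by omega
          rw [if_pos hidx, htab i hi, if_pos ⟨by simp [heq], hf⟩]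
        · have hidx : i ≠ (c - 101).toNat := by omega
          rw [if_neg hidx, htab i hi, if_neg (by simp [heq]), List.append_nil]

-- step-equation lemmas for the two folds
theorem pvStepA_skip (n : Int) (s : List (List (String × String)) × Option Int × String × List String)
    (raw : String) (h : pvSkip (PySem.Str.strip raw) = true) : pvStepA n s raw = s := by
  simp only [pvStepA, h, if_true]

theorem pvStepA_header (n : Int) (table : List (List (String × String))) (chain : Option Int)
    (header : String) (frags : List String) (raw : String)
    (h1 : pvSkip (PySem.Str.strip raw) = false)
    (h2 : PySem.Str.startswith (PySem.Str.strip raw) ">" = true) :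
    pvStepA n (table, chain, header, frags) raw =
      (pvFlushA n table chain header frags,
       pvChainUpd n chain (pvHeaderOf (PySem.Str.strip raw)),
       pvHeaderOf (PySem.Str.strip raw), []) := by
  simp only [pvStepA, h1, h2, Bool.false_eq_true, if_false, if_true]

theorem pvStepA_seq (n : Int) (table : List (List (String × String))) (chain : Option Int)
    (header : String) (frags : List String) (raw : String)
    (h1 : pvSkip (PySem.Str.strip raw) = false)
    (h2 : PySem.Str.startswith (PySem.Str.strip raw) ">" = false) :
    pvStepA n (table, chain, header, frags) raw =
      (match chain with
       | some _ => (table, chain, header, frags ++ [PySem.Str.strip raw])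
       | none => (table, chain, header, frags)) := by
  simp only [pvStepA, h1, h2, Bool.false_eq_true, if_false]

theorem pvStepB_header (n : Int) (records : List (String × Option Int × List String))
    (chain : Option Int) (line : String)
    (h : PySem.Str.startswith line ">" = true) :
    pvStepB n (records, chain) line =
      (records ++ [(pvHeaderOf line, pvChainUpd n chain (pvHeaderOf line), [])],
       pvChainUpd n chain (pvHeaderOf line)) := by
  simp only [pvStepB, h, if_true]

theorem pvStepB_seq (n : Int) (records : List (String × Option Int × List String))
    (chain : Option Int) (line : String)
    (h : PySem.Str.startswith line ">" = false) :
    pvStepB n (records, chain) line =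
      (match chain with
       | some _ => (pvAppendLast records line, chain)
       | none => (records, chain)) := by
  cases chain <;> simp only [pvStepB, h, Bool.false_eq_true, if_false]

-- main simulation: A's fold over the raw lines and B's fold over the filtered stripped
-- lines stay related by pvInv
theorem pvConcatInj {α : Type} {l1 l2 : List α} {a b : α} (h : l1 ++ [a] = l2 ++ [b]) :
    l1 = l2 ∧ a = b := by
  have := List.append_inj' h rfl
  exact ⟨this.1, by simpa using this.2⟩

theorem pvMain (n : Int) (lines : List String) :
    ∀ (table : List (List (String × String))) (chain : Option Int) (header : String)
      (frags : List String) (records : List (String × Option Int × List String)),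
      pvInv n table chain header frags records →
      pvRel n (lines.foldl (pvStepA n) (table, chain, header, frags))
        (((lines.map PySem.Str.strip).filter (fun l => !pvSkip l)).foldl (pvStepB n)
          (records, chain)) := by
  induction lines with
  | nil => exact fun table chain header frags records hInv => ⟨hInv, rfl⟩
  | cons raw rest ih =>
    intro table chain header frags records hInv
    rw [List.foldl_cons, List.map_cons]
    by_cases hskip : pvSkip (PySem.Str.strip raw) = true
    · rw [pvStepA_skip n _ raw hskip, List.filter_cons_of_neg (by simp [hskip])]
      exact ih table chain header frags records hInv
    · have hskip' : pvSkip (PySem.Str.strip raw) = false := by simpa using hskip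
      rw [List.filter_cons_of_pos (by simp [hskip']), List.foldl_cons]
      obtain ⟨hlen, hgood, hnil, hcons⟩ := hInv
      by_cases hhd : PySem.Str.startswith (PySem.Str.strip raw) ">" = true
      · rw [pvStepA_header n table chain header frags raw hskip' hhd,
            pvStepB_header n records chain _ hhd]
        obtain ⟨hlen', htab'⟩ := pvFlush_agg n table chain header frags records
          ⟨hlen, hgood, hnil, hcons⟩
        refine ih _ _ _ _ _ ⟨hlen', pvChainUpd_good n chain _ hgood, ?_, ?_⟩
        · intro h; simp at h
        · intro rs r hr
          obtain ⟨h1, h2⟩ := pvConcatInj hr.symm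
          subst h1 h2
          exact ⟨rfl, htab'⟩
      · have hhd' : PySem.Str.startswith (PySem.Str.strip raw) ">" = false := by simpa using hhd
        rw [pvStepA_seq n table chain header frags raw hskip' hhd',
            pvStepB_seq n records chain _ hhd']
        cases chain with
        | none => exact ih table none header frags records ⟨hlen, hgood, hnil, hcons⟩
        | some c =>
          rcases records.eq_nil_or_concat with hrec | ⟨rs, r, hrec⟩
          · exact absurd (hnil hrec).1 (by simp)
          · rw [List.concat_eq_append] at hrec
            obtain ⟨hr, htab⟩ := hcons rs r hrec
            rw [hrec, pvAppendLast_concat, hr]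
            refine ih _ _ _ _ _ ⟨hlen, hgood, by intro h; simp at h, ?_⟩
            intro rs' r' hr'
            obtain ⟨h1, h2⟩ := pvConcatInj hr'.symm
            subst h1 h2
            exact ⟨rfl, htab⟩

theorem pvInit (n : Int) : pvInv n (List.replicate n.toNat []) none "" [] [] := by
  refine ⟨by simp, ?_, ?_, ?_⟩
  · intro c hc; cases hc
  · refine fun _ => ⟨rfl, rfl, fun i => ?_⟩
    rcases Nat.lt_or_ge i n.toNat with h | h <;>
      simp [List.getD, h, Nat.not_lt.mpr]
  · intro rs r hr; simp at hr

-- ===== VERDICT (by name: the statement is the Claim_ definition above) =====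
theorem parse_paired_a3m_chai_py_spec : Claim_equal_parse_paired_a3m_chai_py := by
  intro content num_chains _
  show parse_paired_a3m_chai_py content num_chains =
    parse_paired_a3m_chai_py_alt content num_chains
  simp only [parse_paired_a3m_chai_py, parse_paired_a3m_chai_py_alt]
  obtain ⟨hInv, -⟩ := pvMain num_chains (PySem.Str.splitlines content)
    (List.replicate num_chains.toNat []) none "" [] [] (pvInit num_chains)
  obtain ⟨-, htab⟩ := pvFlush_agg num_chains _ _ _ _ _ hInv
  apply List.map_congr_left
  intro i hi
  rw [List.mem_range] at hi
  rw [htab i hi]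
  show ((i : Int), _) = ((i : Int), (pvAgg _ i).drop 1)
  by_cases h : pvAgg ((((PySem.Str.splitlines content).map PySem.Str.strip).filter
      (fun l => !pvSkip l)).foldl (pvStepB num_chains) ([], none)).1 i = [] <;>
    simp [h]
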